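-- pv_equiv track=rewrite | github.com/henrikmidtiby/math-exercises | src/exercise_converter/createOverviewOfExercises.py | generate_tree_expression
-- ===== SOURCE A (Python) =====
-- def get_all_sub_paths(filename):
--     parts_of_filename = filename.split("/")
--     for k in range(len(parts_of_filename) + 1):
--         yield parts_of_filename[0:k]
--
-- def is_new_path_included_in_the_reference_path(reference_path, new_path):
--     if len(reference_path) < len(new_path):
--         return False
--     for k in range(len(new_path)):
--         if reference_path[k] != new_path[k]:
--             return False
--     return True
--
-- def leaf_of_path_prefixed_with_tabs(path, text):
--     number_of_indents = len(path) - 1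
--     return "\t"*number_of_indents + path[-1] + text
--
-- def generate_tree_expression(list_of_filenames, number_of_exercises_in_files, names_of_exercises):
--     output = ""
--     last_path = []
--     for filename in list_of_filenames:
--         parts_of_filename = filename.split("/")
--         for val in get_all_sub_paths(filename):
--             if not is_new_path_included_in_the_reference_path(last_path, val):
--                 current_path_name = "/".join(val)
--                 number_of_exercises = number_of_exercises_in_files[current_path_name]
--                 text = " (%d) " % number_of_exercises
--                 try:
--                     text += names_of_exercises[current_path_name]
--                 except:
--                     pass
--                 output += leaf_of_path_prefixed_with_tabs(val, text)
--                 output += "\n"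
--         last_path = parts_of_filename
--     return output
-- ===== SOURCE B (Python) =====
-- def _take_run(head, suffixes):
--     run = []
--     while suffixes and suffixes[0] and suffixes[0][0] == head:
--         run.append(suffixes[0][1:])
--         suffixes = suffixes[1:]
--     return run, suffixes
--
-- def generate_tree_expression(list_of_filenames, number_of_exercises_in_files, names_of_exercises):
--     def render(prefix, suffixes):
--         lines = []
--         while suffixes:
--             first = suffixes[0]
--             if not first:
--                 suffixes = suffixes[1:]
--                 continue
--             head = first[0]
--             run, suffixes = _take_run(head, suffixes[1:])
--             path = prefix + [head]
--             name = "/".join(path)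
--             text = " (%d) " % number_of_exercises_in_files[name]
--             try:
--                 text += names_of_exercises[name]
--             except KeyError:
--                 pass
--             lines.append("\t" * (len(path) - 1) + head + text + "\n")
--             lines.extend(render(path, [first[1:]] + run))
--         return lines
--     return "".join(render([], [f.split("/") for f in list_of_filenames]))
-- ===== Notes on version B (the rewrite author's own statement) =====
-- stated objective: alternative
-- what changed: B renders the tree recursively: it groups consecutive suffix lists into runs sharing their head component, emits one line per run head and recurses one level deeper into the run, instead of A's linear scan that enumerates every prefix of every filename and tests it element-wise against the previous path.
import Mathlib
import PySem

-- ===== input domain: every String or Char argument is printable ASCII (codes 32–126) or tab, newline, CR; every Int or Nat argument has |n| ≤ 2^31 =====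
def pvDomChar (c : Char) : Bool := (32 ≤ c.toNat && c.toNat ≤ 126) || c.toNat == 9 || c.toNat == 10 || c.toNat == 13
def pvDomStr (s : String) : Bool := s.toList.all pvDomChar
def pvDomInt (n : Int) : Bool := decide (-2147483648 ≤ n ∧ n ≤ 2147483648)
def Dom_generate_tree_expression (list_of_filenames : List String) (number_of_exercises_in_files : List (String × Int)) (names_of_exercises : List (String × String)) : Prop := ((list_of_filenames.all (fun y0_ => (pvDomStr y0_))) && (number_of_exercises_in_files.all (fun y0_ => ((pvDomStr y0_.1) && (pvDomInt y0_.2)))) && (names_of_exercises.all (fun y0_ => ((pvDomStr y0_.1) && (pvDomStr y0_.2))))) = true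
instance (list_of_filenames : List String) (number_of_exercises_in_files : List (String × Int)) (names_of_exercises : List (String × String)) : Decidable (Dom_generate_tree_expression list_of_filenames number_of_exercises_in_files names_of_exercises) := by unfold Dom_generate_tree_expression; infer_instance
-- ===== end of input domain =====

-- B renders the filenames as a tree recursively: it groups consecutive suffixes into runs sharing
-- their head component, emits one line per run head, and recurses into the run one level deeper —
-- replacing A's linear scan that tests every prefix against the previous path (objective: alternative).

-- Python's  s * n  on strings (empty for n ≤ 0); used by both ports for "\t" * k
def pyStrMul (s : String) (n : Int) : String := String.join (List.replicate n.toNat s)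

-- filename.split("/"); "/" is a non-empty separator, so split? always returns some
def pvSplitSlash (s : String) : List String := (PySem.Str.split? s "/").getD []

-- ===== PORT A =====
def get_all_sub_paths (filename : String) : List (List String) :=
  let parts_of_filename := pvSplitSlash filename
  (PySem.List.pyRange 0 ((parts_of_filename.length : Int) + 1) 1).map
    (fun k => PySem.List.slice parts_of_filename (some 0) (some k))

def is_new_path_included_in_the_reference_path (reference_path new_path : List String) : Bool :=
  if reference_path.length < new_path.length then false
  else (List.range new_path.length).all
    (fun k => PySem.List.pyGetD reference_path (k : Int) "" == PySem.List.pyGetD new_path (k : Int) "")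

def leaf_of_path_prefixed_with_tabs (path : List String) (text : String) : String :=
  pyStrMul "\t" ((path.length : Int) - 1) ++ PySem.List.pyGetD path (-1) "" ++ text

-- body of A's inner `for val in get_all_sub_paths(filename)` loop; none = KeyError propagating
def pvStepA (counts : PySem.Dict String Int) (names : PySem.Dict String String)
    (last_path : List String) (acc : Option String) (val : List String) : Option String :=
  if !(is_new_path_included_in_the_reference_path last_path val) then
    match acc with
    | none => none
    | some output =>
      let current_path_name := PySem.Str.join "/" val
      match PySem.Dict.get? counts current_path_name with
      | none => none   -- KeyError: number_of_exercises_in_files[current_path_name]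
      | some number_of_exercises =>
        let text := " (" ++ PySem.Int.toStr number_of_exercises ++ ") "
        let text := match PySem.Dict.get? names current_path_name with
          | some nm => text ++ nm   -- try: text += names_of_exercises[...]
          | none => text            -- except: pass
        some (output ++ leaf_of_path_prefixed_with_tabs val text ++ "\n")
  else acc

-- body of A's outer loop: state = (output so far (none = raised), last_path)
def pvStepOuterA (counts : PySem.Dict String Int) (names : PySem.Dict String String)
    (st : Option String × List String) (filename : String) : Option String × List String :=
  ((get_all_sub_paths filename).foldl (pvStepA counts names st.2) st.1, pvSplitSlash filename)

def generate_tree_expression (list_of_filenames : List String) (number_of_exercises_in_files : List (String × Int)) (names_of_exercises : List (String × String)) : String :=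
  ((list_of_filenames.foldl
      (pvStepOuterA (PySem.Dict.ofList number_of_exercises_in_files) (PySem.Dict.ofList names_of_exercises))
      (some "", [])).1).getD ""

-- ===== PORT B =====
-- _take_run: collect the tails of the leading suffixes whose head equals `head` (B's inner while loop)
def pvTakeRun (head : String) : List (List String) → List (List String) × List (List String)
  | (x :: xs) :: rest =>
    if x == head then
      let p := pvTakeRun head rest
      (xs :: p.1, p.2)
    else ([], (x :: xs) :: rest)
  | rest => ([], rest)

-- termination measure for render: total size of the suffix lists
def pvM (l : List (List String)) : Nat := (l.map (fun s => s.length + 1)).sum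

theorem pvTakeRun_le (head : String) (rest : List (List String)) :
    pvM (pvTakeRun head rest).1 ≤ pvM rest ∧ pvM (pvTakeRun head rest).2 ≤ pvM rest := by
  induction rest with
  | nil => simp [pvTakeRun]
  | cons s rest ih =>
    match s with
    | [] => simp [pvTakeRun, pvM]
    | x :: xs =>
      by_cases hx : (x == head) = true
      · simp only [pvTakeRun, hx, if_true]
        simp only [pvM, List.map_cons, List.sum_cons, List.length_cons] at *
        omega
      · simp [pvTakeRun, hx, pvM]

-- render (B's recursive renderer): none = KeyError propagating
def pvRender (counts : PySem.Dict String Int) (names : PySem.Dict String String)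
    (pfx : List String) : List (List String) → Option (List String)
  | [] => some []
  | [] :: rest => pvRender counts names pfx rest
  | (h :: t) :: rest =>
    let pr := pvTakeRun h rest
    let path := pfx ++ [h]
    match PySem.Dict.get? counts (PySem.Str.join "/" path) with
    | none => none   -- KeyError: number_of_exercises_in_files[name]
    | some cnt =>
      let text := " (" ++ PySem.Int.toStr cnt ++ ") "
      let text := match PySem.Dict.get? names (PySem.Str.join "/" path) with
        | some nm => text ++ nm   -- try: text += names_of_exercises[name]
        | none => text            -- except KeyError: pass
      let line := pyStrMul "\t" ((path.length : Int) - 1) ++ h ++ text ++ "\n"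
      match pvRender counts names path (t :: pr.1), pvRender counts names pfx pr.2 with
      | some l1, some l2 => some (line :: (l1 ++ l2))
      | _, _ => none
  termination_by suffixes => pvM suffixes
  decreasing_by
  · simp [pvM]
  · have := pvTakeRun_le h rest
    simp only [pvM, List.map_cons, List.sum_cons, List.length_cons] at *
    omega
  · have := pvTakeRun_le h rest
    simp only [pvM, List.map_cons, List.sum_cons, List.length_cons] at *
    omega

def generate_tree_expression_alt (list_of_filenames : List String) (number_of_exercises_in_files : List (String × Int)) (names_of_exercises : List (String × String)) : String :=
  String.join
    ((pvRender (PySem.Dict.ofList number_of_exercises_in_files) (PySem.Dict.ofList names_of_exercises)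
        [] (list_of_filenames.map pvSplitSlash)).getD [])

-- ===== PRECONDITION & SPEC =====
-- every non-empty '/'-prefix of `parts` that is not a prefix of the previous path must be a key of counts
def pvPrefixKeysOk (counts : List (String × Int)) (last_path parts : List String) : Bool :=
  (List.range parts.length).all (fun j =>
    (parts.take (j + 1)).isPrefixOf last_path
    || ((PySem.Dict.ofList counts).get? (PySem.Str.join "/" (parts.take (j + 1)))).isSome)

def pvKeysOkFrom (counts : List (String × Int)) : List String → List String → Bool
  | _, [] => true
  | last_path, f :: rest =>
    pvPrefixKeysOk counts last_path (pvSplitSlash f) && pvKeysOkFrom counts (pvSplitSlash f) rest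

-- Pre_ excludes exactly the inputs on which A raises KeyError: some newly emitted path name
-- (a '/'-prefix of a filename not shared with the previous filename) is missing from number_of_exercises_in_files.
def Pre_generate_tree_expression (list_of_filenames : List String) (number_of_exercises_in_files : List (String × Int)) (names_of_exercises : List (String × String)) : Prop :=
  pvKeysOkFrom number_of_exercises_in_files [] list_of_filenames = true
instance (list_of_filenames : List String) (number_of_exercises_in_files : List (String × Int)) (names_of_exercises : List (String × String)) : Decidable (Pre_generate_tree_expression list_of_filenames number_of_exercises_in_files names_of_exercises) := by unfold Pre_generate_tree_expression; infer_instance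

def pvWitness_generate_tree_expression : List String × (List (String × Int)) × (List (String × String)) :=
  (["a/b", "a/c"], [("a", 2), ("a/b", 1), ("a/c", 1)], [("a", "intro")])

def Spec_generate_tree_expression (list_of_filenames : List String) (number_of_exercises_in_files : List (String × Int)) (names_of_exercises : List (String × String)) (out : String) : Prop := out = generate_tree_expression_alt list_of_filenames number_of_exercises_in_files names_of_exercises
instance (list_of_filenames : List String) (number_of_exercises_in_files : List (String × Int)) (names_of_exercises : List (String × String)) (out : String) : Decidable (Spec_generate_tree_expression list_of_filenames number_of_exercises_in_files names_of_exercises out) := by unfold Spec_generate_tree_expression; infer_instance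

-- ===== CLAIM (what is proved, stated in full; the proofs are below) =====
def Claim_equal_generate_tree_expression : Prop := ∀ (list_of_filenames : List String) (number_of_exercises_in_files : List (String × Int)) (names_of_exercises : List (String × String)), Dom_generate_tree_expression list_of_filenames number_of_exercises_in_files names_of_exercises → Pre_generate_tree_expression list_of_filenames number_of_exercises_in_files names_of_exercises → Spec_generate_tree_expression list_of_filenames number_of_exercises_in_files names_of_exercises (generate_tree_expression list_of_filenames number_of_exercises_in_files names_of_exercises)

-- ===== LEMMAS AND PROOFS =====

-- concatenation of a list of strings
def pvCat (l : List String) : String := l.foldr (· ++ ·) ""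

-- length of the common prefix of two part lists
def pvCommonPrefixLen : List String → List String → Int
  | x :: xs, y :: ys => if x == y then pvCommonPrefixLen xs ys + 1 else 0
  | _, _ => 0

-- the line emitted for full path prefix `val` (key assumed present; the 0 default is never read under Pre_)
def pvPiece (counts : PySem.Dict String Int) (names : PySem.Dict String String) (val : List String) : String :=
  pyStrMul "\t" ((val.length : Int) - 1) ++ PySem.List.pyGetD val (-1) "" ++
    ((" (" ++ PySem.Int.toStr ((counts.get? (PySem.Str.join "/" val)).getD 0) ++ ") ") ++
      (match names.get? (PySem.Str.join "/" val) with | some nm => nm | none => "")) ++ "\n"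

-- the full path prefixes emitted, in emission order: per suffix, all new prefixes w.r.t. the previous one
def sPaths (pfx : List String) : List String → List (List String) → List (List String)
  | _, [] => []
  | last, s :: rest =>
    (List.range (s.length - (pvCommonPrefixLen s last).toNat)).map
      (fun j => pfx ++ s.take ((pvCommonPrefixLen s last).toNat + 1 + j))
    ++ sPaths pfx s rest

theorem pvCat_append (xs ys : List String) : pvCat (xs ++ ys) = pvCat xs ++ pvCat ys := by
  induction xs with
  | nil => simp [pvCat]
  | cons x xs ih => simp [pvCat, List.foldr_cons, String.append_assoc] at *; simp [ih]

theorem pvFoldlCat (l : List String) (a : String) : l.foldl (· ++ ·) a = a ++ pvCat l := by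
  induction l generalizing a with
  | nil => simp [pvCat]
  | cons x l ih => simp [pvCat, ih, String.append_assoc]

theorem pvJoin_eq_cat (l : List String) : String.join l = pvCat l := by
  show l.foldl (· ++ ·) "" = pvCat l
  rw [pvFoldlCat]
  exact String.empty_append

theorem pvCpl_nonneg (xs ys : List String) : 0 ≤ pvCommonPrefixLen xs ys := by
  induction xs generalizing ys with
  | nil => simp [pvCommonPrefixLen]
  | cons x xs ih =>
    cases ys with
    | nil => simp [pvCommonPrefixLen]
    | cons y ys => simp only [pvCommonPrefixLen]; split_ifs <;> [exact add_nonneg (ih ys) one_pos.le; simp]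

theorem pvCpl_le_length (xs ys : List String) : (pvCommonPrefixLen xs ys).toNat ≤ xs.length := by
  induction xs generalizing ys with
  | nil => simp [pvCommonPrefixLen]
  | cons x xs ih =>
    cases ys with
    | nil => simp [pvCommonPrefixLen]
    | cons y ys =>
      simp only [pvCommonPrefixLen]
      split_ifs
      · have := ih ys
        have h0 := pvCpl_nonneg xs ys
        simp only [List.length_cons]
        omega
      · simp

theorem pvCpl_nil (xs : List String) : pvCommonPrefixLen xs [] = 0 := by
  cases xs <;> rfl

theorem pvInc_iff (ref v : List String) :
    is_new_path_included_in_the_reference_path ref v = true ↔ v <+: ref := by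
  unfold is_new_path_included_in_the_reference_path
  split_ifs with h
  · simp only [false_iff]
    intro hp
    have := hp.length_le
    omega
  · rw [List.prefix_iff_getElem]
    simp only [List.all_eq_true, List.mem_range, PySem.List.pyGetD_natCast, beq_iff_eq]
    constructor
    · intro hall
      refine ⟨by omega, fun i hi => ?_⟩
      have hh := hall i hi
      rw [List.getD_eq_getElem ref "" (by omega), List.getD_eq_getElem v "" hi] at hh
      exact hh.symm
    · rintro ⟨hl, hel⟩ k hk
      rw [List.getD_eq_getElem ref "" (by omega), List.getD_eq_getElem v "" hk]
      exact (hel k hk).symm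

theorem pvTake_prefix_iff (parts last : List String) (k : Nat) (hk : k ≤ parts.length) :
    parts.take k <+: last ↔ k ≤ (pvCommonPrefixLen parts last).toNat := by
  induction parts generalizing last k with
  | nil =>
    have hk0 : k = 0 := by simp at hk; omega
    subst hk0
    simp
  | cons p ps ih =>
    cases k with
    | zero => simp
    | succ k =>
      cases last with
      | nil =>
        have h1 : pvCommonPrefixLen (p :: ps) [] = 0 := rfl
        simp [h1]
      | cons l ls =>
        simp only [List.take_succ_cons, pvCommonPrefixLen, List.cons_prefix_cons]
        by_cases hpl : p = l
        · have h0 := pvCpl_nonneg ps ls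
          have := ih ls k (by simpa using hk)
          simp only [hpl, beq_self_eq_true, if_true, true_and, this]
          omega
        · simp only [hpl, false_and, false_iff]
          have : (p == l) = false := by simpa using hpl
          simp [this]

theorem pvChainA (g : List String → Option String) (gs : List String → String)
    (L : List (List String)) (h : ∀ v ∈ L, g v = some (gs v)) (s : String) :
    L.foldl (fun acc v => acc.bind (fun out => (g v).map (fun t => out ++ t))) (some s)
      = some (s ++ pvCat (L.map gs)) := by
  induction L generalizing s with
  | nil => simp [pvCat]
  | cons v L ih =>
    simp only [List.foldl_cons, h v (by simp), Option.bind_some, Option.map_some]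
    rw [ih (fun u hu => h u (by simp [hu]))]
    simp [pvCat, String.append_assoc]

def pvPieceA? (cD : PySem.Dict String Int) (nD : PySem.Dict String String)
    (val : List String) : Option String :=
  (cD.get? (PySem.Str.join "/" val)).map (fun cnt =>
    leaf_of_path_prefixed_with_tabs val
      ((" (" ++ PySem.Int.toStr cnt ++ ") ") ++
        (match nD.get? (PySem.Str.join "/" val) with | some nm => nm | none => "")) ++ "\n")

theorem pvStepA_eq (cD : PySem.Dict String Int) (nD : PySem.Dict String String)
    (last : List String) (acc : Option String) (val : List String) :
    pvStepA cD nD last acc val =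
      if (!is_new_path_included_in_the_reference_path last val) = true
      then acc.bind (fun out => (pvPieceA? cD nD val).map (fun t => out ++ t)) else acc := by
  unfold pvStepA pvPieceA?
  cases hinc : is_new_path_included_in_the_reference_path last val <;>
    cases acc <;> simp only [Bool.not_true, Bool.not_false] <;> try rfl
  cases hg : cD.get? (PySem.Str.join "/" val) with
  | none => simp
  | some cnt =>
    cases hn : nD.get? (PySem.Str.join "/" val) <;>
      simp [leaf_of_path_prefixed_with_tabs, String.append_assoc]

-- from Pre_'s per-filename condition: each newly emitted prefix's key is present
theorem pvKeyOfOk (counts : List (String × Int)) (last parts : List String)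
    (hok : pvPrefixKeysOk counts last parts = true) (k : Nat)
    (hk1 : (pvCommonPrefixLen parts last).toNat < k) (hk2 : k ≤ parts.length) :
    ∃ cnt, (PySem.Dict.ofList counts).get? (PySem.Str.join "/" (parts.take k)) = some cnt := by
  unfold pvPrefixKeysOk at hok
  simp only [List.all_eq_true, List.mem_range, Bool.or_eq_true,
    List.isPrefixOf_iff_prefix] at hok
  obtain hk | hk := hok (k - 1) (by omega)
  · exfalso
    have hkk : k - 1 + 1 = k := by omega
    rw [hkk] at hk
    have := (pvTake_prefix_iff parts last k hk2).mp hk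
    omega
  · rw [Option.isSome_iff_exists] at hk
    have hkk : k - 1 + 1 = k := by omega
    rw [hkk] at hk
    exact hk

theorem pvInnerA (counts : List (String × Int)) (names : PySem.Dict String String)
    (last_path : List String) (f : String)
    (hok : pvPrefixKeysOk counts last_path (pvSplitSlash f) = true) (s : String) :
    (get_all_sub_paths f).foldl (pvStepA (PySem.Dict.ofList counts) names last_path) (some s)
      = some (s ++ pvCat ((sPaths [] last_path [pvSplitSlash f]).map (pvPiece (PySem.Dict.ofList counts) names))) := by
  set parts := pvSplitSlash f with hparts
  set n := parts.length with hn
  set c := (pvCommonPrefixLen parts last_path).toNat with hc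
  have hcn : c ≤ n := pvCpl_le_length parts last_path
  have hvals : get_all_sub_paths f = (List.range (n + 1)).map (fun k => parts.take k) := by
    simp only [get_all_sub_paths, ← hparts]
    rw [show ((parts.length : Int) + 1) = ((parts.length + 1 : Nat) : Int) by push_cast; ring]
    rw [PySem.List.pyRange_zero_natCast, List.map_map]
    simp [Function.comp_def, PySem.List.slice_to_natCast]
    rfl
  rw [hvals]
  have hfun : pvStepA (PySem.Dict.ofList counts) names last_path =
      fun acc val =>
        if (fun v => !is_new_path_included_in_the_reference_path last_path v) val = true
        then acc.bind (fun out => (pvPieceA? (PySem.Dict.ofList counts) names val).map (fun t => out ++ t))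
        else acc := by
    funext acc val
    exact pvStepA_eq _ _ _ _ _
  rw [hfun, ← List.foldl_filter, List.filter_map]
  have hpred : (List.range (n + 1)).filter
        ((fun v => !is_new_path_included_in_the_reference_path last_path v) ∘ (fun k => parts.take k))
      = List.range' (c + 1) (n - c) := by
    have hcongr : (List.range (n + 1)).filter
          ((fun v => !is_new_path_included_in_the_reference_path last_path v) ∘ (fun k => parts.take k))
        = (List.range (n + 1)).filter (fun k => decide (c < k)) := by
      apply List.filter_congr
      intro k hk
      simp only [List.mem_range] at hk
      have hb : is_new_path_included_in_the_reference_path last_path (parts.take k)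
          = decide (k ≤ c) := by
        by_cases hkc : k ≤ c
        · simp only [hkc, decide_true]
          exact (pvInc_iff last_path (parts.take k)).mpr
            ((pvTake_prefix_iff parts last_path k (by omega)).mpr hkc)
        · simp only [hkc, decide_false]
          rw [← Bool.not_eq_true, pvInc_iff last_path (parts.take k),
            pvTake_prefix_iff parts last_path k (by omega)]
          omega
      simp only [Function.comp_apply, hb]
      by_cases hkc : k ≤ c
      · simp [hkc, Nat.not_lt.mpr hkc]
      · have hck : c < k := by omega
        simp [hkc, hck]
    have hsplit : List.range' 0 (n + 1) = List.range' 0 (c + 1) ++ List.range' (c + 1) (n - c) := by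
      have h := List.range'_append (s := 0) (m := c + 1) (n := n - c) (step := 1)
      simp only [Nat.zero_add, Nat.one_mul] at h
      have h2 : c + 1 + (n - c) = n + 1 := by omega
      rw [h2] at h
      exact h.symm
    rw [hcongr, List.range_eq_range', hsplit, List.filter_append]
    rw [List.filter_eq_nil_iff.mpr, List.filter_eq_self.mpr]
    · simp
    · intro a ha
      simp only [List.mem_range'_1] at ha
      simp only [decide_eq_true_eq]
      omega
    · intro a ha
      simp only [List.mem_range'_1] at ha
      simp only [decide_eq_true_eq]
      omega
  rw [hpred]
  have hchain := pvChainA (pvPieceA? (PySem.Dict.ofList counts) names)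
      (pvPiece (PySem.Dict.ofList counts) names)
      ((List.range' (c + 1) (n - c)).map (fun k => parts.take k)) ?hmem s
  case hmem =>
    intro v hv
    simp only [List.mem_map, List.mem_range'_1] at hv
    obtain ⟨k, ⟨hk1, hk2⟩, rfl⟩ := hv
    obtain ⟨cnt, hcnt⟩ := pvKeyOfOk counts last_path parts hok k (by omega) (by omega)
    simp [pvPieceA?, pvPiece, leaf_of_path_prefixed_with_tabs, hcnt]
  rw [hchain]
  simp only [sPaths, List.range'_eq_map_range, List.map_map, List.append_nil]
  rfl

-- chaining pvInnerA over the list of filenames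
theorem pvOuterA (counts : List (String × Int)) (names : PySem.Dict String String)
    (fs : List String) (last_path : List String) (s : String)
    (hok : pvKeysOkFrom counts last_path fs = true) :
    (fs.foldl (pvStepOuterA (PySem.Dict.ofList counts) names) (some s, last_path)).1
      = some (s ++ pvCat ((sPaths [] last_path (fs.map pvSplitSlash)).map (pvPiece (PySem.Dict.ofList counts) names))) := by
  induction fs generalizing last_path s with
  | nil => simp [sPaths, pvCat]
  | cons f rest ih =>
    simp only [pvKeysOkFrom, Bool.and_eq_true] at hok
    obtain ⟨h1, h2⟩ := hok
    simp only [List.foldl_cons, pvStepOuterA]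
    rw [pvInnerA counts names last_path f h1 s]
    rw [ih (pvSplitSlash f) _ h2]
    simp only [List.map_cons, sPaths, List.map_append, pvCat_append, List.append_nil,
      String.append_assoc]

-- ===== B-side lemmas =====

theorem pvTakeRun_spec (h : String) (rest : List (List String)) :
    rest = ((pvTakeRun h rest).1).map (h :: ·) ++ (pvTakeRun h rest).2
    ∧ (∀ x xs r, (pvTakeRun h rest).2 = (x :: xs) :: r → x ≠ h) := by
  induction rest with
  | nil => simp [pvTakeRun]
  | cons s rest ih =>
    match s with
    | [] =>
      refine ⟨by simp [pvTakeRun], ?_⟩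
      intro x xs r hr
      simp [pvTakeRun] at hr
    | x :: xs =>
      by_cases hx : (x == h) = true
      · have hxh : x = h := by simpa using hx
        subst hxh
        refine ⟨?_, ?_⟩
        · simp only [pvTakeRun, hx, if_true, List.map_cons, List.cons_append]
          exact congrArg _ ih.1
        · intro y ys r hr
          simp only [pvTakeRun, hx, if_true] at hr
          exact ih.2 y ys r hr
      · have hx' : (x == h) = false := by simpa using hx
        refine ⟨by simp [pvTakeRun, hx'], ?_⟩
        intro y ys r hr
        have hred : pvTakeRun h ((x :: xs) :: rest) = ([], (x :: xs) :: rest) := by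
          simp [pvTakeRun, hx']
        simp only [hred] at hr
        injection hr with h1 h2
        injection h1 with h3 h4
        subst h3
        simpa using hx

theorem pvCpl_zero_of_head_ne (x : String) (xs last : List String)
    (hne : ∀ y ys, last = y :: ys → x ≠ y) : pvCommonPrefixLen (x :: xs) last = 0 := by
  cases last with
  | nil => rfl
  | cons y ys =>
    have : (x == y) = false := by simpa using hne y ys rfl
    simp [pvCommonPrefixLen, this]

-- resetting 'last' at a run boundary changes nothing
theorem pvReset (pfx last s : List String) (rest : List (List String))
    (h0 : pvCommonPrefixLen s last = 0) :
    sPaths pfx last (s :: rest) = sPaths pfx [] (s :: rest) := by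
  simp [sPaths, h0, pvCpl_nil]

theorem pvCpl_cons_cons (h : String) (u t : List String) :
    (pvCommonPrefixLen (h :: u) (h :: t)).toNat = (pvCommonPrefixLen u t).toNat + 1 := by
  have h0 := pvCpl_nonneg u t
  simp only [pvCommonPrefixLen, beq_self_eq_true, if_true]
  omega

-- a parent-level run folds into one deeper level
theorem pvRunLemma (pfx : List String) (h : String) (run : List (List String))
    (rest' : List (List String)) (hb : ∀ x xs r, rest' = (x :: xs) :: r → x ≠ h) :
    ∀ t, sPaths pfx (h :: t) ((run.map (h :: ·)) ++ rest')
      = sPaths (pfx ++ [h]) t run ++ sPaths pfx [] rest' := by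
  induction run with
  | nil =>
    intro t
    simp only [List.map_nil, List.nil_append, sPaths]
    cases rest' with
    | nil => simp [sPaths]
    | cons s r =>
      cases s with
      | nil => exact pvReset pfx (h :: t) [] r rfl
      | cons x xs =>
        exact pvReset pfx (h :: t) (x :: xs) r
          (pvCpl_zero_of_head_ne x xs (h :: t) (fun y ys hy => by
            injection hy with hy1 _
            subst hy1
            exact hb x xs r rfl))
  | cons u run2 ih =>
    intro t
    simp only [List.map_cons, List.cons_append, sPaths, pvCpl_cons_cons, List.length_cons]
    rw [ih u, ← List.append_assoc]
    have hlen : u.length + 1 - ((pvCommonPrefixLen u t).toNat + 1)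
        = u.length - (pvCommonPrefixLen u t).toNat := by omega
    rw [hlen]
    have hhead : (List.range (u.length - (pvCommonPrefixLen u t).toNat)).map
        (fun j => pfx ++ (h :: u).take ((pvCommonPrefixLen u t).toNat + 1 + 1 + j))
      = (List.range (u.length - (pvCommonPrefixLen u t).toNat)).map
        (fun j => (pfx ++ [h]) ++ u.take ((pvCommonPrefixLen u t).toNat + 1 + j)) := by
      apply List.map_congr_left
      intro j hj
      have hstep : (pvCommonPrefixLen u t).toNat + 1 + 1 + j
          = ((pvCommonPrefixLen u t).toNat + 1 + j) + 1 := by omega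
      rw [hstep, List.take_succ_cons]
      simp
    rw [hhead]

-- the key decomposition of the emitted paths matching one step of render
theorem pvDecomp (pfx : List String) (h : String) (t : List String) (rest : List (List String)) :
    sPaths pfx [] ((h :: t) :: rest)
      = (pfx ++ [h]) :: (sPaths (pfx ++ [h]) [] (t :: (pvTakeRun h rest).1) ++ sPaths pfx [] (pvTakeRun h rest).2) := by
  obtain ⟨heq, hb⟩ := pvTakeRun_spec h rest
  have hrun := pvRunLemma pfx h (pvTakeRun h rest).1 (pvTakeRun h rest).2 hb t
  have hhead : (List.range (t.length + 1)).map (fun j => pfx ++ (h :: t).take (0 + 1 + j))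
      = (pfx ++ [h]) :: (List.range t.length).map (fun j => (pfx ++ [h]) ++ t.take (0 + 1 + j)) := by
    rw [List.range_succ_eq_map, List.map_cons, List.map_map]
    congr 1
    apply List.map_congr_left
    intro j hj
    simp only [Function.comp_apply, Nat.succ_eq_add_one]
    have hs : 0 + 1 + (j + 1) = (0 + 1 + j) + 1 := by omega
    rw [hs, List.take_succ_cons]
    simp
  conv_lhs => rw [sPaths, heq]
  rw [hrun]
  conv_rhs => rw [sPaths]
  simp only [pvCpl_nil, Int.toNat_zero, Nat.sub_zero, List.length_cons]
  rw [hhead]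
  simp [List.append_assoc]

theorem pvRender_unfold_cons (C : PySem.Dict String Int) (N : PySem.Dict String String)
    (pfx : List String) (h : String) (t : List String) (rest : List (List String)) :
    pvRender C N pfx ((h :: t) :: rest)
      = match C.get? (PySem.Str.join "/" (pfx ++ [h])) with
        | none => none
        | some cnt =>
          match pvRender C N (pfx ++ [h]) (t :: (pvTakeRun h rest).1),
                pvRender C N pfx (pvTakeRun h rest).2 with
          | some l1, some l2 =>
            some ((pyStrMul "\t" (((pfx ++ [h]).length : Int) - 1) ++ h ++
                ((" (" ++ PySem.Int.toStr cnt ++ ") ") ++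
                  (match N.get? (PySem.Str.join "/" (pfx ++ [h])) with
                    | some nm => nm | none => "")) ++ "\n") :: (l1 ++ l2))
          | _, _ => none := by
  rw [pvRender]
  cases hg : C.get? (PySem.Str.join "/" (pfx ++ [h])) with
  | none => rfl
  | some cnt =>
    cases hn : N.get? (PySem.Str.join "/" (pfx ++ [h])) <;>
      cases pvRender C N (pfx ++ [h]) (t :: (pvTakeRun h rest).1) <;>
      cases pvRender C N pfx (pvTakeRun h rest).2 <;>
      simp [String.append_assoc]

-- render computes exactly the pieces of the emitted paths (keys present)
theorem pvRender_eq (C : PySem.Dict String Int) (N : PySem.Dict String String) :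
    ∀ (n : Nat) (suffixes : List (List String)) (pfx : List String), pvM suffixes ≤ n →
    (∀ p ∈ sPaths pfx [] suffixes, (C.get? (PySem.Str.join "/" p)).isSome) →
    pvRender C N pfx suffixes = some ((sPaths pfx [] suffixes).map (pvPiece C N)) := by
  intro n
  induction n with
  | zero =>
    intro suffixes pfx hm _
    cases suffixes with
    | nil => simp [pvRender, sPaths]
    | cons s rest => simp [pvM] at hm
  | succ n ih =>
    intro suffixes pfx hm hkeys
    match suffixes with
    | [] => simp [pvRender, sPaths]
    | [] :: rest =>
      rw [pvRender]
      have hs : sPaths pfx [] ([] :: rest) = sPaths pfx [] rest := by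
        simp [sPaths, pvCpl_nil]
      rw [hs] at hkeys ⊢
      exact ih rest pfx (by simp [pvM] at hm ⊢; omega) hkeys
    | (h :: t) :: rest =>
      have hdec := pvDecomp pfx h t rest
      have hk1 : (C.get? (PySem.Str.join "/" (pfx ++ [h]))).isSome := by
        apply hkeys
        rw [hdec]
        simp
      obtain ⟨cnt, hcnt⟩ := Option.isSome_iff_exists.mp hk1
      have hle := pvTakeRun_le h rest
      have hih1 := ih (t :: (pvTakeRun h rest).1) (pfx ++ [h])
        (by simp only [pvM, List.map_cons, List.sum_cons, List.length_cons] at hm hle ⊢; omega)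
        (fun p hp => hkeys p (by rw [hdec]; simp [hp]))
      have hih2 := ih (pvTakeRun h rest).2 pfx
        (by simp only [pvM, List.map_cons, List.sum_cons, List.length_cons] at hm hle ⊢; omega)
        (fun p hp => hkeys p (by rw [hdec]; simp [hp]))
      rw [pvRender_unfold_cons, hcnt, hih1, hih2, hdec]
      simp only [List.map_cons, List.map_append, Option.some.injEq]
      congr 1
      simp only [pvPiece, hcnt, Option.getD_some,
        PySem.List.pyGetD_neg_one_append_singleton]

-- Pre_ gives the key-present hypothesis for the emitted paths
theorem pvKeysAll (counts : List (String × Int)) (fs : List String) :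
    ∀ last, pvKeysOkFrom counts last fs = true →
    ∀ p ∈ sPaths [] last (fs.map pvSplitSlash),
      (((PySem.Dict.ofList counts).get? (PySem.Str.join "/" p)).isSome) := by
  induction fs with
  | nil => intro last _ p hp; simp [sPaths] at hp
  | cons f rest ih =>
    intro last hok p hp
    simp only [pvKeysOkFrom, Bool.and_eq_true] at hok
    obtain ⟨h1, h2⟩ := hok
    simp only [List.map_cons, sPaths, List.mem_append] at hp
    obtain hp | hp := hp
    · simp only [List.mem_map, List.mem_range, List.nil_append] at hp
      obtain ⟨j, hj, rfl⟩ := hp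
      obtain ⟨cnt, hcnt⟩ := pvKeyOfOk counts last (pvSplitSlash f) h1
        ((pvCommonPrefixLen (pvSplitSlash f) last).toNat + 1 + j) (by omega) (by omega)
      simp [hcnt]
    · exact ih (pvSplitSlash f) h2 p hp

-- ===== VERDICT (by name: the statement is the Claim_ definition above) =====
theorem generate_tree_expression_spec : Claim_equal_generate_tree_expression := by
  intro fs counts names _ hpre
  unfold Spec_generate_tree_expression
  unfold Pre_generate_tree_expression at hpre
  unfold generate_tree_expression generate_tree_expression_alt
  rw [pvOuterA counts (PySem.Dict.ofList names) fs [] "" hpre]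
  rw [pvRender_eq (PySem.Dict.ofList counts) (PySem.Dict.ofList names)
      (pvM (fs.map pvSplitSlash)) (fs.map pvSplitSlash) [] le_rfl
      (pvKeysAll counts fs [] hpre)]
  simp [pvJoin_eq_cat]
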